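-- pv_equiv track=rewrite | github.com/atrep123/ESPOS | tools/icon_pipeline.py | _c_ident
-- ===== SOURCE A (Python) =====
-- def _c_ident(name: str) -> str:
--     out = []
--     for ch in name:
--         if ch.isalnum() or ch == '_':
--             out.append(ch.lower())
--         else:
--             out.append('_')
--     ident = ''.join(out)
--     while '__' in ident:
--         ident = ident.replace('__', '_')
--     return ident.strip('_')
-- ===== SOURCE B (Python) =====
-- def _c_ident(name: str) -> str:
--     tokens = []
--     cur = []
--     for ch in name:
--         if ch.isalnum():
--             cur.append(ch.lower())
--         elif cur:
--             tokens.append(''.join(cur))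
--             cur = []
--     if cur:
--         tokens.append(''.join(cur))
--     return '_'.join(tokens)
-- ===== Notes on version B (the rewrite author's own statement) =====
-- stated objective: simpler
-- what changed: A maps every character to its lowered form or an underscore, then repeatedly runs string replace until no doubled underscore remains and finally strips edge underscores; B does a single tokenize-and-join pass: it collects the maximal alphanumeric runs (lowercased) and joins them with single underscores, so the collapse loop and the strip disappear.
import Mathlib
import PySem

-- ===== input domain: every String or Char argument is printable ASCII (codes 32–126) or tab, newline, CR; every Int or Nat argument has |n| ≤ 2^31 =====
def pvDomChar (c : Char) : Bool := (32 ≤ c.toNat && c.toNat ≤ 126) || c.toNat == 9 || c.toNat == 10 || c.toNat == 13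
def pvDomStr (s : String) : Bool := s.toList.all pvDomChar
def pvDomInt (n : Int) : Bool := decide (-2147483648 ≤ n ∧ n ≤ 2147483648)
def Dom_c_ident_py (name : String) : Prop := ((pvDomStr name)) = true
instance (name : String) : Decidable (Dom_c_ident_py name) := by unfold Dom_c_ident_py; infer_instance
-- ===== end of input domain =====

-- B replaces A's map-then-collapse-while-loop-then-strip pipeline by a single
-- tokenize-and-join pass (objective: simpler; same linear cost).


-- ===== PORT A =====
-- The next three declarations only justify termination of the while-loop `cIdentLoop`
-- (cited in its decreasing_by): one pass of ident.replace('__', '_') shortens the string.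
def onePass : List Char → List Char
  | [] => []
  | [c] => [c]
  | a :: b :: t => if a = '_' ∧ b = '_' then '_' :: onePass t else a :: onePass (b :: t)
termination_by l => l.length

theorem go_eq_onePass : ∀ (fuel : Nat) (l acc : List Char), l.length ≤ fuel →
    PySem.Chars.replace.go ['_', '_'] ['_'] fuel l acc = acc.reverse ++ onePass l := by
  intro fuel
  induction fuel with
  | zero => intro l acc h; have : l = [] := by cases l <;> simp_all
            subst this; simp [PySem.Chars.replace.go, onePass]
  | succ f ih =>
    intro l acc h
    match l with
    | [] => simp [PySem.Chars.replace.go, onePass]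
    | [c] =>
      simp only [PySem.Chars.replace.go, onePass]
      have hp : List.isPrefixOf ['_', '_'] [c] = false := by simp [List.isPrefixOf]
      rw [hp, ih [] (c :: acc) (by simp)]
      simp [onePass]
    | a :: b :: t =>
      simp only [PySem.Chars.replace.go]
      by_cases hab : a = '_' ∧ b = '_'
      · obtain ⟨ha, hb⟩ := hab; subst ha hb
        have hp : List.isPrefixOf ['_', '_'] ('_' :: '_' :: t) = true := by
          simp [List.isPrefixOf]
        rw [hp]
        simp only [List.length_cons] at h
        rw [ih _ _ (by simp; omega)]
        simp [onePass]
      · have hp : List.isPrefixOf ['_', '_'] (a :: b :: t) = false := by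
          simp [List.isPrefixOf]; intro h1 h2; exact hab ⟨h1.symm, h2.symm⟩
        rw [hp]
        simp only [List.length_cons] at h
        rw [ih (b :: t) (a :: acc) (by simp; omega)]
        simp [onePass, hab]

theorem replace_eq_onePass (l : List Char) :
    PySem.Chars.replace l ['_', '_'] ['_'] = onePass l := by
  simp [PySem.Chars.replace, go_eq_onePass l.length l [] le_rfl]

theorem onePass_length_le (l : List Char) : (onePass l).length ≤ l.length := by
  fun_induction onePass l with
  | case1 => simp
  | case2 => simp
  | case3 a b t h ih => simp at ih ⊢; omega
  | case4 a b t h ih => simp at ih ⊢; omega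

theorem onePass_length_lt (l : List Char) (h : ['_', '_'] <:+: l) :
    (onePass l).length < l.length := by
  fun_induction onePass l with
  | case1 => simp at h
  | case2 c => exfalso; have := h.length_le; simp at this
  | case3 a b t hab ih =>
    have := onePass_length_le t
    simp; omega
  | case4 a b t hab ih =>
    have hbt : ['_', '_'] <:+: b :: t := by
      rcases (List.infix_cons_iff).1 h with hp | hi
      · exfalso
        rcases List.cons_prefix_cons.1 hp with ⟨h1, hp2⟩
        rcases List.cons_prefix_cons.1 hp2 with ⟨h2, _⟩
        exact hab ⟨h1.symm, h2.symm⟩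
      · exact hi
    have := ih hbt
    simp at this ⊢; omega

theorem replace_length_lt (l : List Char) (h : PySem.Chars.isIn ['_', '_'] l = true) :
    (PySem.Chars.replace l ['_', '_'] ['_']).length < l.length := by
  rw [replace_eq_onePass]
  exact onePass_length_lt l ((PySem.Chars.isIn_iff_infix _ _).1 h)

-- the 'while "__" in ident: ident = ident.replace("__", "_")' loop of A
def cIdentLoop (ident : List Char) : List Char :=
  if h : PySem.Chars.isIn ['_', '_'] ident then
    cIdentLoop (PySem.Chars.replace ident ['_', '_'] ['_'])
  else ident
termination_by ident.length
decreasing_by exact replace_length_lt ident h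

def c_ident_py (name : String) : String :=
  let out : List Char := name.toList.foldl
    (fun out ch =>
      out ++ [if PySem.Chars.isalnum ch || ch == '_' then PySem.Chars.lowerChar ch else '_']) []
  let ident := cIdentLoop out
  String.ofList (PySem.Chars.stripChars ident ['_'])

-- ===== PORT B =====
def c_ident_py_alt (name : String) : String :=
  let st := name.toList.foldl
    (fun (st : List (List Char) × List Char) ch =>
      if PySem.Chars.isalnum ch then (st.1, st.2 ++ [PySem.Chars.lowerChar ch])
      else if st.2.isEmpty then st
      else (st.1 ++ [st.2], []))
    ([], [])
  let toks := if st.2.isEmpty then st.1 else st.1 ++ [st.2]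
  String.ofList (PySem.Chars.join ['_'] toks)

-- ===== PRECONDITION & SPEC =====
def Spec_c_ident_py (name : String) (out : String) : Prop := out = c_ident_py_alt name
instance (name : String) (out : String) : Decidable (Spec_c_ident_py name out) := by unfold Spec_c_ident_py; infer_instance

-- ===== CLAIM (what is proved, stated in full; the proofs are below) =====
def Claim_equal_c_ident_py : Prop := ∀ (name : String), Dom_c_ident_py name → Spec_c_ident_py name (c_ident_py name)

-- ===== LEMMAS AND PROOFS =====

-- the fully collapsed string (no '__' left): what A's while loop computes
def collapse : List Char → List Char
  | [] => []
  | [c] => [c]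
  | a :: b :: t => if a = '_' ∧ b = '_' then collapse (b :: t) else a :: collapse (b :: t)
termination_by l => l.length

-- the token list: maximal runs of non-'_' characters, `cur` the pending run
def runsP (cur : List Char) : List Char → List (List Char)
  | [] => if cur = [] then [] else [cur]
  | c :: t => if c = '_' then (if cur = [] then runsP [] t else cur :: runsP [] t)
              else runsP (cur ++ [c]) t

-- what A's per-character mapping does (A's `f` agrees with this, see fmap_eq_gmap)
def gmap (ch : Char) : Char :=
  if PySem.Chars.isalnum ch then PySem.Chars.lowerChar ch else '_'

-- B's step function (the literal lambda of c_ident_py_alt)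
def stepB (st : List (List Char) × List Char) (ch : Char) : List (List Char) × List Char :=
  if PySem.Chars.isalnum ch then (st.1, st.2 ++ [PySem.Chars.lowerChar ch])
  else if st.2.isEmpty then st
  else (st.1 ++ [st.2], [])

theorem char_le_toNat {a b : Char} (h : a ≤ b) : a.toNat ≤ b.toNat :=
  UInt32.le_iff_toNat_le.mp (Char.le_def.mp h)

theorem lowerChar_ne_underscore (c : Char) (h : PySem.Chars.isalnum c = true) :
    PySem.Chars.lowerChar c ≠ '_' := by
  intro he
  have h95 : (PySem.Chars.lowerChar c).toNat = 95 := by rw [he]; decide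
  simp only [PySem.Chars.isalnum, PySem.Chars.isalpha, PySem.Chars.isupper,
    PySem.Chars.islower, PySem.Chars.isdigit, Bool.or_eq_true,
    Bool.and_eq_true, decide_eq_true_eq] at h
  simp only [PySem.Chars.lowerChar, PySem.Chars.isupper, Bool.and_eq_true, decide_eq_true_eq] at h95
  split_ifs at h95 with hu
  · have h1 := char_le_toNat hu.1
    have h2 := char_le_toNat hu.2
    have hA : ('A' : Char).toNat = 65 := by decide
    have hZ : ('Z' : Char).toNat = 90 := by decide
    rw [hA] at h1; rw [hZ] at h2
    rw [Char.toNat_ofNat, if_pos (Or.inl (by omega))] at h95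
    omega
  · rcases h with (⟨hu2, _⟩ | ⟨h1, h2⟩) | ⟨h1, h2⟩
    · exact hu ⟨hu2, by assumption⟩
    · have := char_le_toNat h1; have := char_le_toNat h2
      have ha : ('a' : Char).toNat = 97 := by decide
      have hz : ('z' : Char).toNat = 122 := by decide
      omega
    · have := char_le_toNat h1; have := char_le_toNat h2
      have h0 : ('0' : Char).toNat = 48 := by decide
      have h9 : ('9' : Char).toNat = 57 := by decide
      omega

theorem fmap_eq_gmap (ch : Char) :
    (if PySem.Chars.isalnum ch || ch == '_' then PySem.Chars.lowerChar ch else '_') = gmap ch := by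
  by_cases ha : PySem.Chars.isalnum ch = true
  · simp [ha, gmap]
  · by_cases hu : ch = '_'
    · subst hu; simp [gmap, ha]; decide
    · simp [ha, hu, gmap]

theorem head?_collapse (l : List Char) : (collapse l).head? = l.head? := by
  fun_induction collapse l with
  | case1 => rfl
  | case2 => rfl
  | case3 a b t hab ih =>
    obtain ⟨ha, hb⟩ := hab; subst ha hb
    simpa using ih
  | case4 a b t hab ih => simp

theorem collapse_cons (c : Char) (l : List Char) :
    collapse (c :: l) =
      if c = '_' ∧ (collapse l).head? = some '_' then collapse l else c :: collapse l := by
  cases l with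
  | nil => simp [collapse]
  | cons b t =>
    rw [head?_collapse]
    simp only [collapse, List.head?_cons]
    by_cases hab : c = '_' ∧ b = '_'
    · simp [hab.1, hab.2]
    · rw [if_neg hab, if_neg]
      intro ⟨h1, h2⟩
      exact hab ⟨h1, by simpa using h2⟩

theorem collapse_onePass (l : List Char) : collapse (onePass l) = collapse l := by
  fun_induction onePass l with
  | case1 => rfl
  | case2 => rfl
  | case3 a b t hab ih =>
    obtain ⟨ha, hb⟩ := hab; subst ha hb
    rw [collapse_cons, ih, ← collapse_cons]
    simp [collapse]
  | case4 a b t hab ih =>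
    rw [collapse_cons, ih, head?_collapse]
    simp only [List.head?_cons]
    rw [if_neg, collapse]
    · simp [hab]
    · intro ⟨h1, h2⟩; exact hab ⟨h1, by simpa using h2⟩

theorem collapse_of_no_pair (l : List Char) (h : ¬ ['_', '_'] <:+: l) : collapse l = l := by
  fun_induction collapse l with
  | case1 => rfl
  | case2 => rfl
  | case3 a b t hab ih =>
    exfalso; apply h
    obtain ⟨h1, h2⟩ := hab; subst h1 h2
    exact ⟨[], t, by simp⟩
  | case4 a b t hab ih =>
    rw [ih]
    intro hi
    exact h (hi.trans (List.suffix_cons a (b :: t)).isInfix)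

theorem cIdentLoop_eq_collapse (l : List Char) : cIdentLoop l = collapse l := by
  fun_induction cIdentLoop l with
  | case1 l _ ih => rw [ih, replace_eq_onePass, collapse_onePass]
  | case2 l h =>
    rw [collapse_of_no_pair]
    intro hi
    exact h ((PySem.Chars.isIn_iff_infix _ _).2 hi)

-- B's fold computes runsP over the mapped string
theorem foldB_eq_runsP (cs : List Char) (toks : List (List Char)) (cur : List Char) :
    (let st := cs.foldl stepB (toks, cur);
     if st.2.isEmpty then st.1 else st.1 ++ [st.2]) =
    toks ++ runsP cur (cs.map gmap) := by
  induction cs generalizing toks cur with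
  | nil => cases cur <;> simp [runsP]
  | cons ch t ih =>
    by_cases ha : PySem.Chars.isalnum ch = true
    · have hne := lowerChar_ne_underscore ch ha
      have hstep : stepB (toks, cur) ch = (toks, cur ++ [PySem.Chars.lowerChar ch]) := by
        simp [stepB, ha]
      rw [List.foldl_cons, hstep, ih]
      simp [runsP, gmap, ha, hne]
    · have hg : gmap ch = '_' := by simp [gmap, ha]
      by_cases hc : cur = []
      · subst hc
        have hstep : stepB (toks, []) ch = (toks, []) := by simp [stepB, ha]
        rw [List.foldl_cons, hstep, ih]
        simp [runsP, hg]
      · have hstep : stepB (toks, cur) ch = (toks ++ [cur], []) := by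
          simp [stepB, ha, hc]
        rw [List.foldl_cons, hstep, ih]
        simp [runsP, hg, hc]

-- runsP consumes a '_'-free block into the pending run
theorem runsP_cons_ne (cur : List Char) (c : Char) (t : List Char) (hc : c ≠ '_') :
    runsP cur (c :: t) = runsP (cur ++ [c]) t := by
  rw [runsP, if_neg hc]

theorem runsP_append_run (u : List Char) (hu : '_' ∉ u) :
    ∀ (cur v : List Char), runsP cur (u ++ v) = runsP (cur ++ u) v := by
  induction u with
  | nil => simp
  | cons c cu ih =>
    intro cur v
    have hc : c ≠ '_' := fun h => hu (h ▸ List.mem_cons_self)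
    have hcu : '_' ∉ cu := fun h => hu (List.mem_cons_of_mem _ h)
    rw [List.cons_append, runsP_cons_ne _ _ _ hc, ih hcu]
    simp

-- collapse passes a '_'-free block through unchanged
theorem collapse_append_run (u : List Char) (hu : '_' ∉ u) (v : List Char) :
    collapse (u ++ v) = u ++ collapse v := by
  induction u with
  | nil => simp
  | cons c cu ih =>
    have hc : c ≠ '_' := fun h => hu (h ▸ List.mem_cons_self)
    have hcu : '_' ∉ cu := fun h => hu (List.mem_cons_of_mem _ h)
    rw [List.cons_append, collapse_cons, if_neg (fun h => hc h.1), ih hcu]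
    simp

-- dropWhile across an appended block whose head is kept
theorem dropWhile_append_kept {p : Char → Bool} (w : List Char) {y : List Char}
    (hy : ∃ a ys, y = a :: ys ∧ p a = false) :
    List.dropWhile p (w ++ y) = List.dropWhile p w ++ y := by
  obtain ⟨a, ys, rfl, hpa⟩ := hy
  rw [List.dropWhile_append]
  by_cases hw : (List.dropWhile p w).isEmpty
  · rw [if_pos hw, List.dropWhile_cons_of_neg (by simp [hpa])]
    simp_all
  · rw [if_neg hw]

theorem takeWhile_no_underscore (t : List Char) :
    '_' ∉ t.takeWhile (fun c => !(c == '_')) := by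
  intro h
  have := List.mem_takeWhile_imp h
  simp at this

theorem dropWhile_underscore_shape (t : List Char) :
    t.dropWhile (fun c => !(c == '_')) = [] ∨
    ∃ r, t.dropWhile (fun c => !(c == '_')) = '_' :: r := by
  cases hd : t.dropWhile (fun c => !(c == '_')) with
  | nil => exact Or.inl rfl
  | cons c r =>
    right
    have := List.head?_dropWhile_not (fun c => !(c == '_')) t
    rw [hd] at this
    simp at this
    exact ⟨r, by rw [this]⟩

-- the predicate of A's strip('_')
def pUnd : Char → Bool := fun c => List.contains ['_'] c
def lstripU (x : List Char) : List Char := List.dropWhile pUnd x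
def rstripU (x : List Char) : List Char := (List.dropWhile pUnd x.reverse).reverse

theorem stripChars_eq (s : List Char) :
    PySem.Chars.stripChars s ['_'] = rstripU (lstripU s) := rfl

theorem pUnd_underscore : pUnd '_' = true := by decide

theorem pUnd_of_ne {c : Char} (hc : c ≠ '_') : pUnd c = false := by
  simp [pUnd, hc]

theorem rev_head (l : List Char) (hl : l ≠ []) :
    ∃ a ys, l.reverse = a :: ys ∧ a ∈ l := by
  cases hr : l.reverse with
  | nil => exact absurd (by simpa using congrArg List.reverse hr) hl
  | cons a ys =>
    refine ⟨a, ys, rfl, ?_⟩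
    have : a ∈ l.reverse := hr ▸ List.mem_cons_self
    simpa using this

theorem intercalate_singleton' (s a : List Char) : List.intercalate s [a] = a := by
  simp [List.intercalate]

theorem intercalate_cons₂ (s a b : List Char) (l : List (List Char)) :
    List.intercalate s (a :: b :: l) = a ++ s ++ List.intercalate s (b :: l) := by
  simp [List.intercalate, List.intersperse]

-- rstrip across a block ending in a non-'_' character
theorem rstripU_append_run (u : List Char)
    (h : ∃ a ys, u.reverse = a :: ys ∧ pUnd a = false) (b : List Char) :
    rstripU (u ++ b) = u ++ rstripU b := by
  unfold rstripU
  rw [List.reverse_append, dropWhile_append_kept _ h, List.reverse_append]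
  simp

theorem run_rev (c : Char) (u : List Char) (hnu : '_' ∉ c :: u) :
    ∃ a ys, (c :: u).reverse = a :: ys ∧ pUnd a = false := by
  obtain ⟨a, ys, hr, ha⟩ := rev_head (c :: u) (by simp)
  exact ⟨a, ys, hr, pUnd_of_ne (fun he => hnu (he ▸ ha))⟩

-- the collapse of a string headed by a non-'_' character, split at its first run
theorem collapse_run_split (c : Char) (hc : c ≠ '_') (t : List Char) :
    collapse (c :: t) =
      (c :: t.takeWhile (fun d => !(d == '_'))) ++ collapse (t.dropWhile (fun d => !(d == '_'))) := by
  have hu : '_' ∉ c :: t.takeWhile (fun d => !(d == '_')) := by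
    intro h
    rcases List.mem_cons.1 h with h | h
    · exact hc h.symm
    · exact takeWhile_no_underscore t h
  calc collapse (c :: t)
      = collapse ((c :: t.takeWhile (fun d => !(d == '_'))) ++ t.dropWhile (fun d => !(d == '_'))) := by
        rw [List.cons_append, List.takeWhile_append_dropWhile]
    _ = _ := collapse_append_run _ hu _

-- rstrip of the collapse of a '_'-headed string, in terms of the tokens
theorem rstrip_collapse_underscore : ∀ (n : Nat) (r : List Char), r.length ≤ n →
    rstripU (collapse ('_' :: r)) =
    (if runsP [] r = [] then []
     else '_' :: List.intercalate ['_'] (runsP [] r)) := by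
  intro n
  induction n with
  | zero =>
    intro r h
    have : r = [] := by cases r <;> simp_all
    subst this
    simp [collapse, runsP, rstripU, pUnd]
  | succ n ih =>
    intro r h
    match r with
    | [] => simp [collapse, runsP, rstripU, pUnd]
    | c :: r2 =>
      by_cases hc : c = '_'
      · subst hc
        have h1 : collapse ('_' :: '_' :: r2) = collapse ('_' :: r2) := by
          rw [collapse]; simp
        have h2 : runsP [] ('_' :: r2) = runsP [] r2 := by rw [runsP]; simp
        rw [h1, h2]
        exact ih r2 (by simp at h; omega)
      · -- a token starts: r = c :: u ++ w, u the rest of the run, w = [] or '_'-headed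
        set u := r2.takeWhile (fun d => !(d == '_')) with hu_def
        set w := r2.dropWhile (fun d => !(d == '_')) with hw_def
        have hnu : '_' ∉ c :: u := by
          intro hmem
          rcases List.mem_cons.1 hmem with h' | h'
          · exact hc h'.symm
          · exact takeWhile_no_underscore r2 h'
        have hcol : collapse ('_' :: c :: r2) = ('_' :: c :: u) ++ collapse w := by
          rw [collapse_cons,
            if_neg (by rw [head?_collapse]; simp [hc]),
            collapse_run_split c hc r2]
          rfl
        have hsplit : ∃ a ys, ('_' :: c :: u).reverse = a :: ys ∧ pUnd a = false := by
          obtain ⟨a, ys, hr, hpa⟩ := run_rev c u hnu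
          exact ⟨a, ys ++ ['_'], by rw [List.reverse_cons, hr]; rfl, hpa⟩
        have hr2 : u ++ w = r2 := List.takeWhile_append_dropWhile
        have hruns : runsP [] (c :: r2) = runsP (c :: u) w := by
          rw [runsP_cons_ne [] c r2 hc, ← hr2,
            runsP_append_run u (takeWhile_no_underscore r2)]
          simp
        rw [hcol, rstripU_append_run _ hsplit, hruns]
        rcases dropWhile_underscore_shape r2 with hw | ⟨r3, hw⟩
        · rw [← hw_def] at hw
          rw [hw]
          have : runsP (c :: u) ([] : List Char) = [c :: u] := by rw [runsP]; simp
          rw [this, if_neg (List.cons_ne_nil _ _), intercalate_singleton']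
          simp [collapse, rstripU]
        · rw [← hw_def] at hw
          have hlen : r3.length ≤ n := by
            have := congrArg List.length hr2
            rw [hw] at this
            simp at this h
            omega
          have htoks : runsP (c :: u) w = (c :: u) :: runsP [] r3 := by
            rw [hw, runsP]; simp
          rw [htoks, hw, ih r3 hlen, if_neg (List.cons_ne_nil _ _)]
          rcases hL3 : runsP [] r3 with _ | ⟨y, ys⟩
          · rw [if_pos rfl, intercalate_singleton']
            simp
          · rw [if_neg (by simp), intercalate_cons₂]
            simp

theorem lstripU_cons_underscore (x : List Char) : lstripU ('_' :: x) = lstripU x := by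
  unfold lstripU
  rw [List.dropWhile_cons_of_pos pUnd_underscore]

-- strip of the collapse, in terms of the tokens
theorem strip_collapse : ∀ (n : Nat) (m : List Char), m.length ≤ n →
    rstripU (lstripU (collapse m)) = List.intercalate ['_'] (runsP [] m) := by
  intro n
  induction n with
  | zero =>
    intro m h
    have : m = [] := by cases m <;> simp_all
    subst this
    simp [collapse, runsP, rstripU, lstripU, List.intercalate]
  | succ n ih =>
    intro m h
    match m with
    | [] => simp [collapse, runsP, rstripU, lstripU, List.intercalate]
    | c :: t =>
      by_cases hc : c = '_'
      · subst hc
        have h2 : runsP [] ('_' :: t) = runsP [] t := by rw [runsP]; simp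
        have h1 : lstripU (collapse ('_' :: t)) = lstripU (collapse t) := by
          rw [collapse_cons]
          by_cases hh : (collapse t).head? = some '_'
          · rw [if_pos ⟨rfl, hh⟩]
          · rw [if_neg (by intro h'; exact hh h'.2), lstripU_cons_underscore]
        rw [h1, h2]
        exact ih t (by simp at h; omega)
      · set u := t.takeWhile (fun d => !(d == '_')) with hu_def
        set w := t.dropWhile (fun d => !(d == '_')) with hw_def
        have hnu : '_' ∉ c :: u := by
          intro hmem
          rcases List.mem_cons.1 hmem with h' | h'
          · exact hc h'.symm
          · exact takeWhile_no_underscore t h'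
        have hls : lstripU (collapse (c :: t)) = (c :: u) ++ collapse w := by
          rw [collapse_run_split c hc t, ← hu_def, ← hw_def]
          unfold lstripU
          rw [List.cons_append, List.dropWhile_cons_of_neg (by simp [pUnd_of_ne hc])]
        have hr2 : u ++ w = t := List.takeWhile_append_dropWhile
        have hruns : runsP [] (c :: t) = runsP (c :: u) w := by
          rw [runsP_cons_ne [] c t hc, ← hr2,
            runsP_append_run u (takeWhile_no_underscore t)]
          simp
        rw [hls, rstripU_append_run _ (run_rev c u hnu), hruns]
        rcases dropWhile_underscore_shape t with hw | ⟨r3, hw⟩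
        · rw [← hw_def] at hw
          rw [hw]
          have : runsP (c :: u) ([] : List Char) = [c :: u] := by rw [runsP]; simp
          rw [this, intercalate_singleton']
          simp [collapse, rstripU]
        · rw [← hw_def] at hw
          have htoks : runsP (c :: u) w = (c :: u) :: runsP [] r3 := by
            rw [hw, runsP]; simp
          rw [htoks, hw, rstrip_collapse_underscore r3.length r3 le_rfl]
          rcases hL3 : runsP [] r3 with _ | ⟨y, ys⟩
          · rw [if_pos rfl, intercalate_singleton']
            simp
          · rw [if_neg (by simp), intercalate_cons₂]
            simp


theorem c_ident_py_spec : Claim_equal_c_ident_py := by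
  intro name _
  show c_ident_py name = c_ident_py_alt name
  simp only [c_ident_py, c_ident_py_alt]
  rw [PySem.List.foldl_append_singleton_eq_map
    (fun ch => if PySem.Chars.isalnum ch || ch == '_' then PySem.Chars.lowerChar ch else '_')
    name.toList []]
  rw [List.nil_append, List.map_congr_left (fun ch _ => fmap_eq_gmap ch)]
  rw [show (fun (st : List (List Char) × List Char) ch =>
      if PySem.Chars.isalnum ch then (st.1, st.2 ++ [PySem.Chars.lowerChar ch])
      else if st.2.isEmpty then st
      else (st.1 ++ [st.2], [])) = stepB from rfl]
  rw [cIdentLoop_eq_collapse, stripChars_eq,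
    strip_collapse (name.toList.map gmap).length _ le_rfl,
    foldB_eq_runsP name.toList [] []]
  rfl
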